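-- pv_equiv track=rewrite | github.com/MAlshaik/CSE231 | proj08.py | find_max_common_friends
-- ===== SOURCE A (Python) =====
-- def find_max_common_friends(friends_dict):
--     '''This function takes the friends dictionary and finds which pairs of people have the most friends in common. '''
--     max_common_friends = -9999
--     pair = []
--     pair_friends = []
--     for key in friends_dict:
--         for sec in friends_dict:
--             if sec != key and (sec,key) not in pair:
--                 pair.append((key,sec))
--                 pair_friends.append(len(set(friends_dict[key]) & set(friends_dict[sec])))
--
--     max_f = max(pair_friends)
--     max_pair = [pair[i] for i in range(len(pair)) if pair_friends[i] == max_f]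
--
--     return max_pair, max_f
-- ===== SOURCE B (Python) =====
-- def find_max_common_friends(friends_dict):
--     '''Recursive pair/count generation over the key list plus a count-indexed
--     grouping dict; the answer is a single lookup at the maximal count.'''
--     def pair_counts(keys):
--         if not keys:
--             return []
--         a, rest = keys[0], keys[1:]
--         sa = set(friends_dict[a])
--         out = [(len(sa & set(friends_dict[b])), (a, b)) for b in rest]
--         return out + pair_counts(rest)
--
--     groups = {}
--     for c, p in pair_counts(list(friends_dict)):
--         groups[c] = groups.get(c, []) + [p]
--     max_f = max(groups)
--     return groups[max_f], max_f
-- ===== Notes on version B (the rewrite author's own statement) =====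
-- stated objective: faster
-- what changed: Replaces A's full n-by-n double loop with a linear '(sec,key) not in pair' membership scan over an ever-growing pair list, two parallel lists and an index post-filter by a recursive generation of the i<j pairs with their counts, grouped once into a count-indexed dict so the answer is a single lookup at the maximal count.
import Mathlib
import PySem

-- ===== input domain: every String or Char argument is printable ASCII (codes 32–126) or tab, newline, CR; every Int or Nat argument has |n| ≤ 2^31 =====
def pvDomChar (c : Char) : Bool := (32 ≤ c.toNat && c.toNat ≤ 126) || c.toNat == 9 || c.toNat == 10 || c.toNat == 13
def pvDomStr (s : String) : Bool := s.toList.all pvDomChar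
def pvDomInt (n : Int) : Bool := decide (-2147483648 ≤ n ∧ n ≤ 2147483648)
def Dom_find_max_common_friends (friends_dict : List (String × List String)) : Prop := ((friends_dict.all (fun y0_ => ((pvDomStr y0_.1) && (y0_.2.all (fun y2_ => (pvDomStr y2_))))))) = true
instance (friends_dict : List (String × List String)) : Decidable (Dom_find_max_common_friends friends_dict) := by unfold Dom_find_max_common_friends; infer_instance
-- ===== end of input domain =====

-- B replaces A's quadruple-cost scan (all ordered pairs filtered through an ever-growing
-- membership list, two parallel lists, an index post-filter) by recursive i<j pair/count
-- generation grouped into a count-indexed dict read off at the maximal count (faster).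

-- ===== PORT A =====
-- len(set(friends_dict[a]) & set(friends_dict[b])) as an Int (shared subexpression of both Pythons)
def commonCount (d : PySem.Dict String (List String)) (a b : String) : Int :=
  ((PySem.Set.inter (PySem.Set.ofList (d.getD a [])) (PySem.Set.ofList (d.getD b []))).length : Int)

def find_max_common_friends (friends_dict : List (String × List String)) : (List (String × String)) × Int :=
  let d := PySem.Dict.ofList friends_dict
  let st := d.keys.foldl (fun (st : List (String × String) × List Int) key =>
      d.keys.foldl (fun st sec =>
        if sec ≠ key ∧ (sec, key) ∉ st.1 then
          (st.1 ++ [(key, sec)], st.2 ++ [commonCount d key sec])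
        else st) st) ([], [])
  match PySem.List.max? st.2 (fun x => x) with
  | none => ([], 0)  -- Python: max([]) raises ValueError here; excluded by Pre_
  | some max_f =>
      ((PySem.List.pyRange 0 (st.1.length : Int)).foldl
        (fun acc i => if PySem.List.pyGetD st.2 i 0 == max_f then acc ++ [PySem.List.pyGetD st.1 i ("", "")] else acc) [],
       max_f)

-- ===== PORT B =====
-- Source B's recursive helper pair_counts(keys): list of (count, (a, b)) over the i<j pairs
def pairCounts (d : PySem.Dict String (List String)) : List String → List (Int × (String × String))
  | [] => []
  | a :: rest =>
    let sa := PySem.Set.ofList (d.getD a [])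
    rest.map (fun b => (((PySem.Set.inter sa (PySem.Set.ofList (d.getD b []))).length : Int), (a, b)))
      ++ pairCounts d rest

def find_max_common_friends_alt (friends_dict : List (String × List String)) : (List (String × String)) × Int :=
  let d := PySem.Dict.ofList friends_dict
  let groups := (pairCounts d d.keys).foldl
      (fun g p => g.modify p.1 [] (fun x => x ++ [p.2])) PySem.Dict.empty
  match PySem.List.max? groups.keys (fun x => x) with
  | none => ([], 0)  -- Python: max({}) raises ValueError here; excluded by Pre_
  | some max_f => (groups.getD max_f [], max_f)

-- ===== PRECONDITION & SPEC =====
-- Pre_ excludes exactly the inputs with fewer than two distinct keys, on which the Python A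
-- (and the Python B alike) raises ValueError in max() over an empty collection.
def Pre_find_max_common_friends (friends_dict : List (String × List String)) : Prop :=
  2 ≤ (PySem.List.dedup (friends_dict.map Prod.fst)).length

instance (friends_dict : List (String × List String)) : Decidable (Pre_find_max_common_friends friends_dict) := by
  unfold Pre_find_max_common_friends; infer_instance

def pvWitness_find_max_common_friends : (List (String × List String)) :=
  [("amy", ["x", "y"]), ("bob", ["y", "z"])]

def Spec_find_max_common_friends (friends_dict : List (String × List String)) (out : (List (String × String)) × Int) : Prop := out = find_max_common_friends_alt friends_dict
instance (friends_dict : List (String × List String)) (out : (List (String × String)) × Int) : Decidable (Spec_find_max_common_friends friends_dict out) := by unfold Spec_find_max_common_friends; infer_instance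

-- ===== CLAIM (what is proved, stated in full; the proofs are below) =====
def Claim_equal_find_max_common_friends : Prop := ∀ (friends_dict : List (String × List String)), Dom_find_max_common_friends friends_dict → Pre_find_max_common_friends friends_dict → Spec_find_max_common_friends friends_dict (find_max_common_friends friends_dict)

-- ===== LEMMAS AND PROOFS =====

-- the i<j pairs of a key list, in A's (and B's) generation order
def combs : List String → List (String × String)
  | [] => []
  | k :: t => t.map (fun s => (k, s)) ++ combs t

lemma pairCounts_eq (d : PySem.Dict String (List String)) (ks : List String) :
    pairCounts d ks = (combs ks).map (fun p => (commonCount d p.1 p.2, p)) := by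
  induction ks with
  | nil => rfl
  | cons a rest ih =>
      simp [pairCounts, combs, ih, commonCount, List.map_map, Function.comp_def]

-- A's inner loop over the whole key list, given which (sec, k) pairs are already recorded
lemma innerA (d : PySem.Dict String (List String)) (k : String) (pre : List String) :
    ∀ (ks : List String) (P : List (String × String)) (F : List Int),
    (∀ sec ∈ ks, ((sec, k) ∈ P ↔ sec ∈ pre)) →
    ks.foldl (fun st sec =>
        if sec ≠ k ∧ (sec, k) ∉ st.1 then
          (st.1 ++ [(k, sec)], st.2 ++ [commonCount d k sec])
        else st) (P, F)
    = (P ++ (ks.filter (fun s => !pre.contains s && s != k)).map (fun s => (k, s)),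
       F ++ (ks.filter (fun s => !pre.contains s && s != k)).map (fun s => commonCount d k s)) := by
  intro ks
  induction ks with
  | nil => intro P F _; simp
  | cons s t ih =>
      intro P F hinv
      have hs := hinv s (by simp)
      by_cases hc : s ≠ k ∧ (s, k) ∉ P
      · have hnp : s ∉ pre := fun h => hc.2 (hs.mpr h)
        have hinv' : ∀ sec ∈ t, ((sec, k) ∈ P ++ [(k, s)] ↔ sec ∈ pre) := by
          intro sec hsec
          rw [List.mem_append]
          constructor
          · rintro (h | h)
            · exact (hinv sec (by simp [hsec])).mp h
            · simp at h
              exact absurd h.2.symm hc.1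
          · intro h; exact Or.inl ((hinv sec (by simp [hsec])).mpr h)
        simp only [List.foldl_cons, if_pos hc]
        rw [ih (P ++ [(k, s)]) (F ++ [commonCount d k s]) hinv']
        simp [hnp, hc.1]
      · have hcond : ¬ (s ∉ pre ∧ ¬ s = k) := by
          rcases not_and_or.mp hc with h | h
          · simp only [ne_eq, not_not] at h
            intro hx; exact hx.2 h
          · simp only [not_not] at h
            intro hx; exact hx.1 (hs.mp h)
        have hinv' : ∀ sec ∈ t, ((sec, k) ∈ P ↔ sec ∈ pre) := fun sec hsec =>
          hinv sec (by simp [hsec])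
        simp only [List.foldl_cons, if_neg hc]
        rw [ih P F hinv']
        simp [hcond]

-- A's outer loop: processing `rest` with the pairs of `pre` already recorded
lemma outerA (d : PySem.Dict String (List String)) (K : List String) (hnd : K.Nodup) :
    ∀ (rest pre : List String) (P : List (String × String)) (F : List Int),
    pre ++ rest = K →
    (∀ p ∈ P, p.1 ∈ pre) →
    (∀ a ∈ pre, ∀ b ∈ rest, (a, b) ∈ P) →
    rest.foldl (fun st key =>
        K.foldl (fun st sec =>
          if sec ≠ key ∧ (sec, key) ∉ st.1 then
            (st.1 ++ [(key, sec)], st.2 ++ [commonCount d key sec])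
          else st) st) (P, F)
    = (P ++ combs rest, F ++ (combs rest).map (fun p => commonCount d p.1 p.2)) := by
  intro rest
  induction rest with
  | nil => intro pre P F _ _ _; simp [combs]
  | cons k t ih =>
      intro pre P F hK h1 h2
      have hKsplit : K = pre ++ k :: t := hK.symm
      have hndsplit : (pre ++ k :: t).Nodup := hKsplit ▸ hnd
      have hpre : pre.Nodup ∧ (k :: t).Nodup ∧ ∀ a ∈ pre, ∀ b ∈ k :: t, a ≠ b :=
        List.nodup_append.mp hndsplit
      have hinv : ∀ sec ∈ K, ((sec, k) ∈ P ↔ sec ∈ pre) := by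
        intro sec _
        constructor
        · intro h; exact h1 (sec, k) h
        · intro h; exact h2 sec h k (by simp)
      have hfiltK : K.filter (fun s => !pre.contains s && s != k) = t := by
        have hp : pre.filter (fun s => !pre.contains s && s != k) = [] := by
          apply List.filter_eq_nil_iff.mpr
          intro s hs
          simp [hs]
        have hkf : (!pre.contains k && k != k) = false := by simp
        have ht : t.filter (fun s => !pre.contains s && s != k) = t := by
          apply List.filter_eq_self.mpr
          intro s hs
          have hsnp : s ∉ pre := fun hmem => hpre.2.2 s hmem s (by simp [hs]) rfl
          have hsnk : s ≠ k := by
            intro h; subst h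
            exact (List.nodup_cons.mp hpre.2.1).1 hs
          simp [hsnp, hsnk]
        rw [hKsplit, List.filter_append, hp, List.filter_cons, hkf, ht]
        simp
      simp only [List.foldl_cons]
      rw [innerA d k pre K P F hinv, hfiltK]
      rw [ih (pre ++ [k]) (P ++ List.map (fun s => (k, s)) t)
            (F ++ List.map (fun s => commonCount d k s) t)
            (by simpa using hK)
            (by intro p hp
                rcases List.mem_append.mp hp with h | h
                · have := h1 p h; simp [this]
                · rcases List.mem_map.mp h with ⟨s, _, rfl⟩; simp)
            (by intro a ha b hb
                rcases List.mem_append.mp ha with h | h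
                · exact List.mem_append.mpr (Or.inl (h2 a h b (by simp [hb])))
                · simp at h; subst h
                  exact List.mem_append.mpr (Or.inr (List.mem_map.mpr ⟨b, hb, rfl⟩)))]
      simp [combs, List.map_append, List.map_map, Function.comp_def]

-- max over a list with the identity key depends only on membership (Int)
lemma maxId_congr (xs ys : List Int) (h : ∀ x, x ∈ xs ↔ x ∈ ys) :
    PySem.List.max? xs (fun x => x) = PySem.List.max? ys (fun x => x) := by
  cases hx : PySem.List.max? xs (fun x => x) with
  | none =>
      cases hy : PySem.List.max? ys (fun x => x) with
      | none => rfl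
      | some m =>
          have hxe : xs = [] := (PySem.List.max?_eq_none_iff xs _).mp hx
          have hm : m ∈ ys := PySem.List.max?_mem hy
          have : m ∈ xs := (h m).mpr hm
          simp [hxe] at this
  | some m =>
      cases hy : PySem.List.max? ys (fun x => x) with
      | none =>
          have hye : ys = [] := (PySem.List.max?_eq_none_iff ys _).mp hy
          have hm : m ∈ xs := PySem.List.max?_mem hx
          have : m ∈ ys := (h m).mp hm
          simp [hye] at this
      | some m' =>
          have h1 : m ≤ m' := PySem.List.max?_isMax hy m ((h m).mp (PySem.List.max?_mem hx))
          have h2 : m' ≤ m := PySem.List.max?_isMax hx m' ((h m').mpr (PySem.List.max?_mem hy))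
          simp [le_antisymm h1 h2]

-- A's index comprehension over parallel lists C and C.map f is a filter of C
lemma comprA (f : (String × String) → Int) (M : Int) (C : List (String × String)) :
    (PySem.List.pyRange 0 (C.length : Int)).foldl
      (fun acc i => if PySem.List.pyGetD (C.map f) i 0 == M then acc ++ [PySem.List.pyGetD C i ("", "")] else acc) []
    = C.filter (fun p => f p == M) := by
  induction C using List.reverseRecOn with
  | nil => simp [PySem.List.pyRange]
  | append_singleton C q ih =>
      have hlen : ((C ++ [q]).length : Int) = (C.length : Int) + 1 := by simp
      rw [hlen, PySem.List.pyRange_one_succ_right (by positivity), List.foldl_append]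
      have hcong : (PySem.List.pyRange 0 (C.length : Int)).foldl
          (fun acc i => if PySem.List.pyGetD ((C ++ [q]).map f) i 0 == M then acc ++ [PySem.List.pyGetD (C ++ [q]) i ("", "")] else acc) []
        = (PySem.List.pyRange 0 (C.length : Int)).foldl
          (fun acc i => if PySem.List.pyGetD (C.map f) i 0 == M then acc ++ [PySem.List.pyGetD C i ("", "")] else acc) [] := by
        apply PySem.List.foldl_congr_mem
        intro acc i hi
        have hb := PySem.List.mem_pyRange_one.mp hi
        have h0 : 0 ≤ i := hb.1
        have h1 : i < (C.length : Int) := hb.2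
        have hiN : i.toNat < C.length := by omega
        have e1 : PySem.List.pyGetD ((C ++ [q]).map f) i 0 = PySem.List.pyGetD (C.map f) i 0 := by
          rw [PySem.List.pyGetD_eq_getElem _ _ h0 (by simp; omega),
              PySem.List.pyGetD_eq_getElem _ _ h0 (by simp; omega)]
          simp only [List.getElem_map]
          congr 1
          exact List.getElem_append_left hiN
        have e2 : PySem.List.pyGetD (C ++ [q]) i ("", "") = PySem.List.pyGetD C i ("", "") := by
          rw [PySem.List.pyGetD_eq_getElem _ _ h0 (by simp; omega),
              PySem.List.pyGetD_eq_getElem _ _ h0 (by omega)]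
          exact List.getElem_append_left hiN
        rw [e1, e2]
      rw [hcong, ih]
      simp only [List.foldl_cons, List.foldl_nil]
      have hq1 : PySem.List.pyGetD ((C ++ [q]).map f) (C.length : Int) 0 = f q := by
        rw [PySem.List.pyGetD_eq_getElem _ _ (by positivity) (by simp)]
        simp
      have hq2 : PySem.List.pyGetD (C ++ [q]) (C.length : Int) ("", "") = q := by
        rw [PySem.List.pyGetD_eq_getElem _ _ (by positivity) (by simp)]
        simp
      rw [hq1, hq2, List.filter_append]
      by_cases hfq : f q == M
      · simp [hfq]
      · simp [hfq]

-- ===== VERDICT (by name: the statement is the Claim_ definition above) =====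
theorem find_max_common_friends_spec : Claim_equal_find_max_common_friends := by
  intro fd _ _
  unfold Spec_find_max_common_friends find_max_common_friends find_max_common_friends_alt
  dsimp only
  set d := PySem.Dict.ofList fd with hd
  have hnd : d.keys.Nodup := PySem.Dict.nodup_keys_ofList fd
  -- A's double loop computes the i<j pairs and their counts
  have hA := outerA d d.keys hnd d.keys [] [] []
    (by simp) (by simp) (by simp)
  simp only [List.nil_append] at hA
  rw [hA]
  set C := combs d.keys with hC
  set l := pairCounts d d.keys with hl
  have hlC : l = C.map (fun p => (commonCount d p.1 p.2, p)) := pairCounts_eq d d.keys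
  set groups := l.foldl (fun g p => g.modify p.1 [] (fun x => x ++ [p.2])) PySem.Dict.empty with hg
  -- groups' key list has the same members as A's count list
  have hkeys : groups.keys = PySem.Set.update PySem.Dict.empty.keys (l.map Prod.fst) :=
    PySem.Dict.keys_foldl_modify_key l Prod.fst [] (fun _ p x => x ++ [p.2]) PySem.Dict.empty
  have hmap1 : l.map Prod.fst = C.map (fun p => commonCount d p.1 p.2) := by
    rw [hlC, List.map_map]; rfl
  have hkeys' : groups.keys = PySem.Set.ofList (C.map (fun p => commonCount d p.1 p.2)) := by
    rw [hkeys, hmap1]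
    rfl
  have hmax : PySem.List.max? groups.keys (fun x => x)
      = PySem.List.max? (C.map (fun p => commonCount d p.1 p.2)) (fun x => x) := by
    rw [hkeys']
    exact maxId_congr _ _ (fun x => PySem.Set.mem_ofList _ x)
  rw [hmax]
  cases hM : PySem.List.max? (C.map (fun p => commonCount d p.1 p.2)) (fun x => x) with
  | none => rfl
  | some M =>
      dsimp only
      rw [comprA (fun p => commonCount d p.1 p.2) M C, hg,
          PySem.Dict.getD_foldl_modify_append l PySem.Dict.empty M,
          hlC, List.filter_map, List.map_map]
      simp [Function.comp_def]
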